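-- pv_equiv track=rewrite | github.com/G-bgyl/QA-NLP-project | QA_baseline.py | bi_score
-- ===== SOURCE A (Python) =====
-- def bi_score(token_paragraph_bi, token_question_bi):
--     bi_raw_score_list = []
--     # loop through each sent
--     for sent_p in token_paragraph_bi:
--         raw_score_bi = 0
--         # loop through each unigram
--         for word_s in sent_p:
--             for word_q in token_question_bi:
--                 if word_s == word_q:
--                     raw_score_bi += 1
--         bi_raw_score_list.append(raw_score_bi)
--     return bi_raw_score_list
-- ===== SOURCE B (Python) =====
-- def bi_score(token_paragraph_bi, token_question_bi):
--     # Inverted index over the paragraph (bigram -> sentence indices, with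
--     # multiplicity), then scatter one increment per question-bigram hit.
--     index = {}
--     for i, sent in enumerate(token_paragraph_bi):
--         for w in sent:
--             index.setdefault(w, []).append(i)
--     scores = [0] * len(token_paragraph_bi)
--     for q in token_question_bi:
--         for i in index.get(q, []):
--             scores[i] += 1
--     return scores
-- ===== Notes on version B (the rewrite author's own statement) =====
-- stated objective: faster
-- what changed: Inverts the loop structure: B builds an inverted index from bigram to sentence indices (with multiplicity) over the paragraph once, then scatters one increment per question-bigram hit into a score array, instead of A's per-sentence-word rescans of the whole question list.
import Mathlib
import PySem

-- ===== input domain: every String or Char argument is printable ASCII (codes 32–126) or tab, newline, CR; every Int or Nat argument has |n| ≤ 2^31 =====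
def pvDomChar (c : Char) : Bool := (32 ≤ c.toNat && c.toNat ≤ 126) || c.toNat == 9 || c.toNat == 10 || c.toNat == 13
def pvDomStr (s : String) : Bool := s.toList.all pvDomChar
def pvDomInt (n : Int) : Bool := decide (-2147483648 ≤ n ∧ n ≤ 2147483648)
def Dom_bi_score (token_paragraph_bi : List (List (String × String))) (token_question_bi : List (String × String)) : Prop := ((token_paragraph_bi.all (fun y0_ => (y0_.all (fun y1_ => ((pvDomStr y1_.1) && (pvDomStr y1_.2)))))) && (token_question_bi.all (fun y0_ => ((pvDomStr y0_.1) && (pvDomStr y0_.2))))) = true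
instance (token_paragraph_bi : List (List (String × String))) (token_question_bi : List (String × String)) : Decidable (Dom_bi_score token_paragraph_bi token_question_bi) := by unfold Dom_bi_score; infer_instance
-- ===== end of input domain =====

-- B inverts the loop structure: it builds an inverted index (bigram -> sentence
-- indices with multiplicity) over the paragraph once and then scatters one
-- increment per question-bigram hit, instead of rescanning the question list
-- for every sentence word (objective: faster).

-- ===== PORT A =====
def bi_score (token_paragraph_bi : List (List (String × String))) (token_question_bi : List (String × String)) : List Int :=
  token_paragraph_bi.foldl
    (fun bi_raw_score_list sent_p =>
      bi_raw_score_list ++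
        [sent_p.foldl
          (fun raw_score_bi word_s =>
            token_question_bi.foldl
              (fun r word_q => if word_s == word_q then r + 1 else r)
              raw_score_bi)
          0])
    []

-- ===== PORT B =====
def bi_score_alt (token_paragraph_bi : List (List (String × String))) (token_question_bi : List (String × String)) : List Int :=
  let index : PySem.Dict (String × String) (List Int) :=
    (PySem.List.enumerate token_paragraph_bi 0).foldl
      (fun d p => p.2.foldl (fun d w => d.modify w [] (fun l => l ++ [p.1])) d)
      PySem.Dict.empty
  let scores : List Int := List.replicate token_paragraph_bi.length 0
  token_question_bi.foldl
    (fun s q =>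
      (index.getD q []).foldl
        (fun s i => PySem.List.pySetD s i (PySem.List.pyGetD s i 0 + 1)) s)
    scores

-- ===== PRECONDITION & SPEC =====
def Spec_bi_score (token_paragraph_bi : List (List (String × String))) (token_question_bi : List (String × String)) (out : List Int) : Prop := out = bi_score_alt token_paragraph_bi token_question_bi
instance (token_paragraph_bi : List (List (String × String))) (token_question_bi : List (String × String)) (out : List Int) : Decidable (Spec_bi_score token_paragraph_bi token_question_bi out) := by unfold Spec_bi_score; infer_instance

-- ===== CLAIM (what is proved, stated in full; the proofs are below) =====
def Claim_equal_bi_score : Prop := ∀ (token_paragraph_bi : List (List (String × String))) (token_question_bi : List (String × String)), Dom_bi_score token_paragraph_bi token_question_bi → Spec_bi_score token_paragraph_bi token_question_bi (bi_score token_paragraph_bi token_question_bi)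

-- ===== LEMMAS AND PROOFS =====

-- ---------- A side ----------

-- A's innermost loop adds the count of word_s in the question
theorem inner_count (tq : List (String × String)) (w : String × String) (r : Int) :
    tq.foldl (fun r word_q => if w == word_q then r + 1 else r) r = r + tq.count w := by
  induction tq generalizing r with
  | nil => simp
  | cons q qs ih =>
    simp only [List.foldl, List.count_cons, ih]
    by_cases h : w = q
    · simp [h]; omega
    · have hb : (w == q) = false := by simpa using h
      have hb' : (q == w) = false := by simpa using fun hq => h hq.symm
      simp [hb, hb']

theorem foldl_append_map (tp : List (List (String × String))) (f : List (String × String) → Int)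
    (acc : List Int) :
    tp.foldl (fun l s => l ++ [f s]) acc = acc ++ tp.map f := by
  induction tp generalizing acc with
  | nil => simp
  | cons s ss ih => simp [List.foldl, ih]

theorem foldl_add_map (c : (String × String) → Int) (sent : List (String × String)) (r : Int) :
    sent.foldl (fun s w => s + c w) r = r + (sent.map c).sum := by
  induction sent generalizing r with
  | nil => simp
  | cons w ws ih => simp [List.foldl, ih]; ring

-- A as a map of per-sentence sums of question counts
theorem bi_score_eq_map (tp : List (List (String × String))) (tq : List (String × String)) :
    bi_score tp tq
      = tp.map (fun sent => (sent.map (fun w => (tq.count w : Int))).sum) := by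
  unfold bi_score
  rw [foldl_append_map]
  simp only [List.nil_append]
  refine List.map_congr_left (fun sent _ => ?_)
  have h : ∀ r : Int,
      sent.foldl (fun raw w => tq.foldl (fun r q => if w == q then r + 1 else r) raw) r
        = sent.foldl (fun s w => s + (tq.count w : Int)) r := by
    induction sent with
    | nil => intro r; rfl
    | cons w ws ih =>
      intro r
      simp only [List.foldl, inner_count]
  rw [h 0, foldl_add_map]
  simp

-- the double-count swap: summing question counts over the sentence equals
-- summing sentence counts over the question
theorem ind_sum (tq : List (String × String)) (w : String × String) :
    (tq.map (fun q => if q == w then (1 : Int) else 0)).sum = (tq.count w : Int) := by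
  induction tq with
  | nil => simp
  | cons q qs ih =>
    simp only [List.map, List.sum_cons, ih, List.count_cons]
    push_cast
    ring

theorem swap_sum (sent tq : List (String × String)) :
    (tq.map (fun q => (sent.count q : Int))).sum
      = (sent.map (fun w => (tq.count w : Int))).sum := by
  induction sent with
  | nil => simp
  | cons w ws ih =>
    have : (fun q => ((w :: ws).count q : Int))
        = fun q => (ws.count q : Int) + (if q == w then (1 : Int) else 0) := by
      funext q
      by_cases h : q = w
      · subst h; simp
      · have h' : ¬ w = q := fun e => h e.symm
        simp [h, h']
    rw [this]
    simp only [List.sum_map_add, ih, ind_sum, List.map, List.sum_cons]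
    ring

-- ---------- B side: the inverted index ----------

-- one sentence's pass appends i once per occurrence of q
theorem index_sent (sent : List (String × String)) (i : Int)
    (d : PySem.Dict (String × String) (List Int)) (q : String × String) :
    (sent.foldl (fun d w => d.modify w [] (fun l => l ++ [i])) d).getD q []
      = d.getD q [] ++ List.replicate (sent.count q) i := by
  induction sent generalizing d with
  | nil => simp
  | cons w ws ih =>
    simp only [List.foldl, ih, PySem.Dict.getD_modify, List.count_cons]
    by_cases h : q = w
    · subst h
      simp only [beq_self_eq_true, if_true, List.append_assoc, List.replicate_succ,
        List.append_cancel_left_eq]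
      rw [List.singleton_append, ← List.replicate_succ, List.replicate_succ']
    · have hb : (w == q) = false := by simpa using fun hq => h hq.symm
      simp [h, hb]

-- the whole build: the bucket of q lists every sentence index, with multiplicity
theorem index_fold (ps : List (Int × List (String × String)))
    (d : PySem.Dict (String × String) (List Int)) (q : String × String) :
    (ps.foldl (fun d p => p.2.foldl (fun d w => d.modify w [] (fun l => l ++ [p.1])) d) d).getD q []
      = d.getD q [] ++ ps.flatMap (fun p => List.replicate (p.2.count q) p.1) := by
  induction ps generalizing d with
  | nil => simp
  | cons p ps ih =>
    simp only [List.foldl, ih, index_sent, List.flatMap_cons, List.append_assoc]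

-- counts inside the flattened buckets
theorem hit_count_lt (xs : List (List (String × String))) (q : String × String) (s t : Int)
    (h : t < s) :
    ((PySem.List.enumerate xs s).flatMap
        (fun p => List.replicate (p.2.count q) p.1)).count t = 0 := by
  induction xs generalizing s with
  | nil => simp [PySem.List.enumerate]
  | cons x xs ih =>
    rw [PySem.List.enumerate_cons]
    simp only [List.flatMap_cons, List.count_append, List.count_replicate]
    have hne : (s == t) = false := by simpa using fun hq => absurd hq.symm (by omega)
    rw [ih (s + 1) (by omega)]
    simp [hne]

theorem hit_count (xs : List (List (String × String))) (q : String × String) (s : Int)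
    (j : Nat) (hj : j < xs.length) :
    ((PySem.List.enumerate xs s).flatMap
        (fun p => List.replicate (p.2.count q) p.1)).count (s + (j : Int))
      = xs[j].count q := by
  induction xs generalizing s j with
  | nil => simp at hj
  | cons x xs ih =>
    rw [PySem.List.enumerate_cons]
    simp only [List.flatMap_cons, List.count_append, List.count_replicate]
    cases j with
    | zero =>
      simp only [Nat.cast_zero, add_zero]
      rw [hit_count_lt xs q (s + 1) s (by omega)]
      simp
    | succ j' =>
      have hcast : s + ((j' + 1 : Nat) : Int) = (s + 1) + (j' : Int) := by push_cast; ring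
      rw [hcast, ih (s + 1) j' (by simpa using Nat.lt_of_succ_lt_succ hj)]
      have hne2 : (s == (s + 1) + (j' : Int)) = false := by
        simpa using by omega
      simp [hne2]

-- every stored index is a valid sentence index
theorem hit_mem (xs : List (List (String × String))) (q : String × String) (i : Int)
    (h : i ∈ (PySem.List.enumerate xs 0).flatMap
        (fun p => List.replicate (p.2.count q) p.1)) :
    0 ≤ i ∧ i < (xs.length : Int) := by
  rcases List.mem_flatMap.mp h with ⟨p, hp, hi⟩
  have := List.eq_of_mem_replicate hi
  subst this
  rcases (PySem.List.mem_enumerate_iff xs 0 p).mp hp with ⟨k, hk, rfl⟩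
  constructor <;> [positivity; (simp; exact_mod_cast hk)]

-- ---------- B side: the scatter loop ----------

theorem scat_length (L : List Int) (s : List Int) :
    (L.foldl (fun s i => PySem.List.pySetD s i (PySem.List.pyGetD s i 0 + 1)) s).length
      = s.length := by
  induction L generalizing s with
  | nil => rfl
  | cons i L ih => simp [List.foldl, ih, PySem.List.length_pySetD]

theorem scat_getD (L : List Int) (s : List Int)
    (hL : ∀ i ∈ L, 0 ≤ i ∧ i < (s.length : Int)) (j : Nat) (hj : j < s.length) :
    (L.foldl (fun s i => PySem.List.pySetD s i (PySem.List.pyGetD s i 0 + 1)) s).getD j 0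
      = s.getD j 0 + (L.count (j : Int) : Int) := by
  induction L generalizing s with
  | nil => simp
  | cons i L ih =>
    obtain ⟨h0, h1⟩ := hL i (List.mem_cons_self ..)
    have hset : PySem.List.pySetD s i (PySem.List.pyGetD s i 0 + 1)
        = s.set i.toNat (s[i.toNat]'(by omega) + 1) := by
      rw [PySem.List.pySetD_of_nonneg _ _ h0, PySem.List.pyGetD_eq_getElem _ _ h0 h1]
    have hlen : (s.set i.toNat (s[i.toNat]'(by omega) + 1)).length = s.length := by simp
    have hL' : ∀ x ∈ L, 0 ≤ x ∧ x < (((s.set i.toNat (s[i.toNat]'(by omega) + 1)).length : Nat) : Int) := by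
      intro x hx; rw [hlen]; exact hL x (List.mem_cons_of_mem _ hx)
    simp only [List.foldl, hset]
    rw [ih _ hL' (by simpa using hj)]
    have hgd : (s.set i.toNat (s[i.toNat]'(by omega) + 1)).getD j 0
        = s.getD j 0 + (if i == (j : Int) then (1 : Int) else 0) := by
      rw [List.getD_eq_getElem _ _ (by omega), List.getD_eq_getElem _ _ hj,
        List.getElem_set]
      by_cases hij : i.toNat = j
      · have : (i == (j : Int)) = true := by
          simp only [beq_iff_eq]; omega
        simp [hij, this]
      · have : (i == (j : Int)) = false := by
          simp only [beq_eq_false_iff_ne, ne_eq]; omega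
        simp [hij, this]
    rw [hgd, List.count_cons]
    by_cases hij : i = (j : Int)
    · simp [hij]; ring
    · have h1' : (i == (j : Int)) = false := by simpa using hij
      simp [h1']

-- the question loop accumulates bucket counts
theorem quest_length (tq : List (String × String))
    (bucket : (String × String) → List Int) (s : List Int) :
    (tq.foldl (fun s q => (bucket q).foldl
        (fun s i => PySem.List.pySetD s i (PySem.List.pyGetD s i 0 + 1)) s) s).length
      = s.length := by
  induction tq generalizing s with
  | nil => rfl
  | cons q tq ih => simp [List.foldl, ih, scat_length]

theorem quest_getD (tq : List (String × String))
    (bucket : (String × String) → List Int) (s : List Int)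
    (hB : ∀ q, ∀ i ∈ bucket q, 0 ≤ i ∧ i < (s.length : Int)) (j : Nat) (hj : j < s.length) :
    (tq.foldl (fun s q => (bucket q).foldl
        (fun s i => PySem.List.pySetD s i (PySem.List.pyGetD s i 0 + 1)) s) s).getD j 0
      = s.getD j 0 + (tq.map (fun q => ((bucket q).count (j : Int) : Int))).sum := by
  induction tq generalizing s with
  | nil => simp
  | cons q tq ih =>
    simp only [List.foldl, List.map, List.sum_cons]
    have hlen := scat_length (bucket q) s
    have hB' : ∀ q', ∀ i ∈ bucket q', 0 ≤ i ∧ i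
        < (((bucket q).foldl (fun s i => PySem.List.pySetD s i (PySem.List.pyGetD s i 0 + 1)) s).length : Int) := by
      intro q' i hi; rw [hlen]; exact hB q' i hi
    rw [ih _ hB' (by omega), scat_getD (bucket q) s (hB q) j hj]
    ring

-- ===== VERDICT (by name: the statement is the Claim_ definition above) =====
theorem bi_score_spec : Claim_equal_bi_score := by
  intro tp tq _
  unfold Spec_bi_score bi_score_alt
  have hbq : ∀ q : String × String,
      ((PySem.List.enumerate tp 0).foldl
        (fun d p => p.2.foldl (fun d w => d.modify w [] (fun l => l ++ [p.1])) d)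
        (PySem.Dict.empty : PySem.Dict (String × String) (List Int))).getD q []
      = (PySem.List.enumerate tp 0).flatMap (fun p => List.replicate (p.2.count q) p.1) := by
    intro q; rw [index_fold]; simp
  have hB : ∀ q : String × String, ∀ i ∈
      ((PySem.List.enumerate tp 0).foldl
        (fun d p => p.2.foldl (fun d w => d.modify w [] (fun l => l ++ [p.1])) d)
        (PySem.Dict.empty : PySem.Dict (String × String) (List Int))).getD q [],
      0 ≤ i ∧ i < ((List.replicate tp.length (0 : Int)).length : Int) := by
    intro q i hi
    rw [hbq q] at hi
    simpa using hit_mem tp q i hi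
  rw [bi_score_eq_map]
  apply List.ext_getElem
  · rw [quest_length]
    simp
  · intro j h1 h2
    have hj : j < tp.length := by simpa using h1
    have hlen : j < (List.replicate tp.length (0 : Int)).length := by simpa using hj
    rw [List.getElem_map,
      ← List.getD_eq_getElem _ 0 h2,
      quest_getD tq _ (List.replicate tp.length 0) hB j hlen]
    have hz : (List.replicate tp.length (0 : Int)).getD j 0 = 0 := by
      rw [List.getD_eq_getElem _ _ hlen]; simp
    rw [hz, zero_add, ← swap_sum]
    refine congrArg List.sum (List.map_congr_left fun q _ => ?_)
    rw [hbq q]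
    have := hit_count tp q 0 j hj
    simpa using this.symm
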